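-- pv_equiv track=rewrite | github.com/vijaychandar186/compiler-design | exercises/python/04a_left_factoring/left_factoring.py | left_factor_once
-- ===== SOURCE A (Python) =====
-- from collections import OrderedDict
--
-- def longest_common_prefix(productions):
--     """
--     Find the longest common prefix shared by two or more productions.
--     Returns the prefix (a list of symbols), or an empty list if no common
--     prefix of length >= 1 exists among any pair of productions.
--     """
--     if len(productions) < 2:
--         return []
--
--     # Try decreasing prefix lengths.  For each candidate length, check if
--     # at least two productions share that prefix.
--     max_len = max(len(p) for p in productions)
--
--     best_prefix = []
--     for length in range(1, max_len + 1):
--         # group productions by their prefix of this length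
--         groups = {}
--         for prod in productions:
--             if len(prod) >= length:
--                 key = tuple(prod[:length])
--                 groups.setdefault(key, []).append(prod)
--
--         # find the longest prefix shared by >= 2 productions
--         found = False
--         for prefix_tuple, members in groups.items():
--             if len(members) >= 2:
--                 best_prefix = list(prefix_tuple)
--                 found = True
--                 break  # take the first group found at this length
--         if not found:
--             break  # no group of size >= 2 at this length, stop
--
--     return best_prefix
--
-- def new_nonterminal(base, grammar):
--     """Generate a new non-terminal name like A', A'', etc."""
--     candidate = base + "'"
--     while candidate in grammar:
--         candidate += "'"
--     return candidate
--
-- def left_factor_once(grammar):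
--     """
--     Perform one round of left factoring.
--     Returns (new_grammar, changed) where changed is True if any factoring was done.
--     """
--     new_grammar = OrderedDict()
--     changed = False
--
--     for nt, prods in grammar.items():
--         prefix = longest_common_prefix(prods)
--
--         if not prefix:
--             # no common prefix -- keep productions as-is
--             new_grammar[nt] = prods
--             continue
--
--         changed = True
--         prefix_len = len(prefix)
--
--         # Partition productions into those that match the prefix and those that don't
--         matching = []
--         non_matching = []
--         for prod in prods:
--             if prod[:prefix_len] == prefix:
--                 matching.append(prod)
--             else:
--                 non_matching.append(prod)
--
--         # Create new non-terminal for the suffixes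
--         new_nt = new_nonterminal(nt, grammar)
--
--         # The original non-terminal gets:  prefix new_nt  +  non_matching prods
--         factored_prod = prefix + [new_nt]
--         new_prods = [factored_prod] + non_matching
--         new_grammar[nt] = new_prods
--
--         # New non-terminal gets the suffixes
--         suffix_prods = []
--         for prod in matching:
--             suffix = prod[prefix_len:]
--             if not suffix:
--                 suffix = ["eps"]  # empty production
--             suffix_prods.append(suffix)
--         new_grammar[new_nt] = suffix_prods
--
--     return new_grammar, changed
-- ===== SOURCE B (Python) =====
-- from collections import OrderedDict
--
-- def left_factor_once(grammar):
--     """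
--     One round of left factoring, via a single prefix-count table per
--     nonterminal instead of re-grouping productions once per length.
--     Returns (new_grammar, changed).
--     """
--     new_grammar = OrderedDict()
--     changed = False
--
--     for nt, prods in grammar.items():
--         # Count every prefix of every production once.
--         cnt = {}
--         for p in prods:
--             for k in range(1, len(p) + 1):
--                 t = tuple(p[:k])
--                 cnt[t] = cnt.get(t, 0) + 1
--
--         # Deepest length at which some prefix is shared by >= 2 productions.
--         best_len = 0
--         for t, c in cnt.items():
--             if c >= 2 and len(t) > best_len:
--                 best_len = len(t)
--
--         # The first production (in order) carrying a shared prefix of that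
--         # length supplies the prefix -- same tie-break as grouping order.
--         prefix = []
--         if best_len:
--             for p in prods:
--                 if len(p) >= best_len and cnt[tuple(p[:best_len])] >= 2:
--                     prefix = p[:best_len]
--                     break
--
--         if not prefix:
--             new_grammar[nt] = prods
--             continue
--
--         changed = True
--         L = len(prefix)
--
--         new_nt = nt + "'"
--         while new_nt in grammar:
--             new_nt += "'"
--
--         new_prods = [prefix + [new_nt]]
--         suffixes = []
--         for p in prods:
--             if p[:L] == prefix:
--                 suffixes.append(p[L:] or ["eps"])
--             else:
--                 new_prods.append(p)
--         new_grammar[nt] = new_prods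
--         new_grammar[new_nt] = suffixes
--
--     return new_grammar, changed
-- ===== Notes on version B (the rewrite author's own statement) =====
-- stated objective: alternative
-- what changed: Per nonterminal, A regroups the productions into a fresh prefix-groups dict for every candidate length until sharing stops; B builds one count table of all prefixes, reads off the deepest length shared by >=2 productions, and recovers the prefix with a single ordered scan, with a single partition pass replacing A's partition-then-suffix loops.
import Mathlib
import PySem

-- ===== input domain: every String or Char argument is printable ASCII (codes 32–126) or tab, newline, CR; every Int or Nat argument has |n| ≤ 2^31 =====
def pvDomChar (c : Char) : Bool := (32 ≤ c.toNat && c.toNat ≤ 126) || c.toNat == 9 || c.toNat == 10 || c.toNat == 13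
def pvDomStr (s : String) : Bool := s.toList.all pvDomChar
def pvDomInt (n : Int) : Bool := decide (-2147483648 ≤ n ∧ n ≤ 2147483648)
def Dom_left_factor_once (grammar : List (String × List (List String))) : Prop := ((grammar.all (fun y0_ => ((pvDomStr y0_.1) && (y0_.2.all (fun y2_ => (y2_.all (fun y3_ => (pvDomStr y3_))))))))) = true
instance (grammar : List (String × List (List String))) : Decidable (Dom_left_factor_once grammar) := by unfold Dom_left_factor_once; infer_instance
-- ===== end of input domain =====

-- B replaces A's per-length regrouping with one prefix-count table per nonterminal
-- (deepest shared length + one ordered scan); alternative algorithm, same results.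


-- ===== PORT A =====
-- A-side helpers: literal transliteration of Source A

-- groups = {}; for prod in productions: if len(prod)>=length: groups.setdefault(tuple(prod[:length]),[]).append(prod)
def lfoGroupsA (productions : List (List String)) (length : Nat) :
    PySem.Dict (List String) (List (List String)) :=
  productions.foldl
    (fun groups prod =>
      if length ≤ prod.length then
        -- groups.setdefault(key, []).append(prod)  ==  groups[key] = groups.get(key, []) + [prod]
        groups.modify (prod.take length) [] (fun ms => ms ++ [prod])
      else groups)
    PySem.Dict.empty

-- the inner "for prefix_tuple, members in groups.items(): if len(members) >= 2: …; break"
def lfoFirstSharedA (productions : List (List String)) (length : Nat) :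
    Option (List String) :=
  ((lfoGroupsA productions length).items.find? (fun pm => 2 ≤ pm.2.length)).map (·.1)

-- the "for length in range(1, max_len + 1)" loop with its break, state = best_prefix
def lfoLcpGoA (productions : List (List String)) :
    Nat → Nat → List String → List String
  | _, 0, best => best
  | length, remaining + 1, best =>
    match lfoFirstSharedA productions length with
    | some pfx => lfoLcpGoA productions (length + 1) remaining pfx
    | none => best

def lfoLcpA (productions : List (List String)) : List String :=
  if productions.length < 2 then []
  else
    let maxLen := ((productions.map List.length).max?).getD 0  -- max(len(p) for p in productions), nonempty here
    lfoLcpGoA productions 1 maxLen []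

-- new_nonterminal: candidate = base + "'"; while candidate in grammar: candidate += "'"
-- fuel keys.length+1 only makes the while-loop total: among the first keys.length+1
-- candidates (all distinct) at least one is not a key, so the fuel is never exhausted.
def lfoNewNTGoA (keys : List String) : Nat → String → String
  | 0, candidate => candidate
  | fuel + 1, candidate =>
    if candidate ∈ keys then lfoNewNTGoA keys fuel (candidate ++ "'") else candidate

def lfoNewNTA (base : String) (keys : List String) : String :=
  lfoNewNTGoA keys (keys.length + 1) (base ++ "'")

-- body of A's "for nt, prods in grammar.items()" loop
def lfoStepA (keys : List String)
    (st : PySem.Dict String (List (List String)) × Bool)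
    (entry : String × List (List String)) :
    PySem.Dict String (List (List String)) × Bool :=
  let nt := entry.1
  let prods := entry.2
  let pfx := lfoLcpA prods
  if pfx.isEmpty then
    (st.1.insert nt prods, st.2)
  else
    let prefixLen := pfx.length
    -- partition loop: matching / non_matching
    let part := prods.foldl
      (fun (mn : List (List String) × List (List String)) prod =>
        if prod.take prefixLen = pfx then (mn.1 ++ [prod], mn.2) else (mn.1, mn.2 ++ [prod]))
      ([], [])
    let newNt := lfoNewNTA nt keys
    let newProds := [pfx ++ [newNt]] ++ part.2
    -- suffix loop over matching
    let suffixProds := part.1.foldl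
      (fun acc prod =>
        let suffix := prod.drop prefixLen
        acc ++ [if suffix.isEmpty then ["eps"] else suffix])
      []
    ((st.1.insert nt newProds).insert newNt suffixProds, true)

def left_factor_once (grammar : List (String × List (List String))) :
    (List (String × List (List String))) × Bool :=
  let res := grammar.foldl (lfoStepA (grammar.map (·.1))) (PySem.Dict.empty, false)
  (res.1.items, res.2)

-- ===== PORT B =====
-- B-side helpers: literal transliteration of Source B

-- inner "t = (); for sym in p: t = t + (sym,); cnt[t] = cnt.get(t, 0) + 1"
def lfoCntB (prods : List (List String)) : PySem.Dict (List String) Int :=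
  prods.foldl
    (fun cnt p =>
      (p.foldl
        (fun (st : PySem.Dict (List String) Int × List String) sym =>
          let t := st.2 ++ [sym]
          (st.1.insert t (st.1.getD t 0 + 1), t))
        (cnt, [])).1)
    PySem.Dict.empty

-- "best_len = 0; for t, c in cnt.items(): if c >= 2 and len(t) > best_len: best_len = len(t)"
def lfoBestLenB (cnt : PySem.Dict (List String) Int) : Nat :=
  cnt.items.foldl
    (fun bestLen tc => if 2 ≤ tc.2 ∧ bestLen < tc.1.length then tc.1.length else bestLen)
    0

-- the scan "for p in prods: if len(p) >= best_len and cnt[tuple(p[:best_len])] >= 2: prefix = p[:best_len]; break"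
-- cnt[t] is exact as getD 0: whenever best_len <= len(p) the key p[:best_len] is present in cnt
-- (it was counted at least once, for p itself), so Python's cnt[t] never raises here.
def lfoScanB (cnt : PySem.Dict (List String) Int) (bestLen : Nat) :
    List (List String) → List String
  | [] => []
  | p :: rest =>
    if bestLen ≤ p.length ∧ 2 ≤ cnt.getD (p.take bestLen) 0 then p.take bestLen
    else lfoScanB cnt bestLen rest

-- "new_nt = nt + \"'\"; while new_nt in grammar: new_nt += \"'\""  (fuel as in A: makes the loop total)
def lfoNewNTGoB (keys : List String) : Nat → String → String
  | 0, newNt => newNt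
  | fuel + 1, newNt =>
    if newNt ∈ keys then lfoNewNTGoB keys fuel (newNt ++ "'") else newNt

-- body of B's "for nt, prods in grammar.items()" loop
def lfoStepB (keys : List String)
    (st : PySem.Dict String (List (List String)) × Bool)
    (entry : String × List (List String)) :
    PySem.Dict String (List (List String)) × Bool :=
  let nt := entry.1
  let prods := entry.2
  let cnt := lfoCntB prods
  let bestLen := lfoBestLenB cnt
  let pfx := if bestLen ≠ 0 then lfoScanB cnt bestLen prods else []
  if pfx.isEmpty then
    (st.1.insert nt prods, st.2)
  else
    let L := pfx.length
    let newNt := lfoNewNTGoB keys (keys.length + 1) (nt ++ "'")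
    -- single partition pass: new_prods = [prefix + [new_nt]] grows with non-matching, suffixes with matching
    let ns := prods.foldl
      (fun (ns : List (List String) × List (List String)) p =>
        if p.take L = pfx then
          (ns.1, ns.2 ++ [if (p.drop L).isEmpty then ["eps"] else p.drop L])
        else (ns.1 ++ [p], ns.2))
      ([pfx ++ [newNt]], [])
    ((st.1.insert nt ns.1).insert newNt ns.2, true)

def left_factor_once_alt (grammar : List (String × List (List String))) :
    (List (String × List (List String))) × Bool :=
  let res := grammar.foldl (lfoStepB (grammar.map (·.1))) (PySem.Dict.empty, false)
  (res.1.items, res.2)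
-- ===== PRECONDITION & SPEC =====
def Spec_left_factor_once (grammar : List (String × List (List String))) (out : (List (String × List (List String))) × Bool) : Prop := out = left_factor_once_alt grammar
instance (grammar : List (String × List (List String))) (out : (List (String × List (List String))) × Bool) : Decidable (Spec_left_factor_once grammar out) := by unfold Spec_left_factor_once; infer_instance

-- ===== CLAIM (what is proved, stated in full; the proofs are below) =====
def Claim_equal_left_factor_once : Prop := ∀ (grammar : List (String × List (List String))), Dom_left_factor_once grammar → Spec_left_factor_once grammar (left_factor_once grammar)

-- ===== LEMMAS AND PROOFS =====

-- ---- common spec pieces ----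

-- number of productions having t as a prefix
def lfoCntp (prods : List (List String)) (t : List String) : Nat :=
  prods.countP (fun q => t.isPrefixOf q)

-- "some prefix of length l is shared by at least two productions"
def lfoSharedP (prods : List (List String)) (l : Nat) : List String → Bool :=
  fun p => decide (l ≤ p.length) && decide (2 ≤ lfoCntp prods (p.take l))

def lfoShared (prods : List (List String)) (l : Nat) : Bool :=
  prods.any (lfoSharedP prods l)

-- the first production (in order) carrying a shared prefix of length l, cut to length l
def lfoPick (prods : List (List String)) (l : Nat) : Option (List String) :=
  (prods.find? (lfoSharedP prods l)).map (·.take l)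

-- b is the deepest shared-prefix length (0 if none)
def lfoIsBest (prods : List (List String)) (b : Nat) : Prop :=
  (b = 0 ∨ (1 ≤ b ∧ lfoShared prods b = true)) ∧ ∀ j, b < j → lfoShared prods j = false

theorem take_prefix_take (p : List String) (l : Nat) : p.take l <+: p.take (l + 1) := by
  have h : (p.take (l + 1)).take l = p.take l := by
    rw [List.take_take]; congr 1; omega
  rw [← h]; exact List.take_prefix l _

theorem lfoCntp_take_mono (prods : List (List String)) (p : List String) (l : Nat) :
    lfoCntp prods (p.take (l + 1)) ≤ lfoCntp prods (p.take l) := by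
  unfold lfoCntp
  refine List.countP_mono_left ?_
  intro q _ hq
  rw [List.isPrefixOf_iff_prefix] at hq ⊢
  exact (take_prefix_take p l).trans hq

theorem lfoShared_mono_step (prods : List (List String)) (l : Nat)
    (h : lfoShared prods (l + 1) = true) : lfoShared prods l = true := by
  unfold lfoShared lfoSharedP at h ⊢
  rw [List.any_eq_true] at h ⊢
  obtain ⟨p, hp, hcond⟩ := h
  simp only [Bool.and_eq_true, decide_eq_true_eq] at hcond
  refine ⟨p, hp, ?_⟩
  simp only [Bool.and_eq_true, decide_eq_true_eq]
  exact ⟨by omega, le_trans hcond.2 (lfoCntp_take_mono prods p l)⟩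

theorem lfoShared_mono (prods : List (List String)) {l m : Nat} (hlm : l ≤ m)
    (h : lfoShared prods m = true) : lfoShared prods l = true := by
  induction m with
  | zero =>
    have : l = 0 := by omega
    simpa [this] using h
  | succ m ih =>
    rcases Nat.lt_or_ge l (m + 1) with hl | hl
    · exact ih (by omega) (lfoShared_mono_step prods m h)
    · have : l = m + 1 := by omega
      simpa [this] using h

-- ---- A side ----

theorem lfoGroupsA_getD_aux (l : Nat) (prods : List (List String)) :
    ∀ (d : PySem.Dict (List String) (List (List String))) (k : List String),
      (prods.foldl
        (fun groups prod =>
          if l ≤ prod.length then groups.modify (prod.take l) [] (fun ms => ms ++ [prod])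
          else groups) d).getD k []
      = d.getD k [] ++ prods.filter (fun p => decide (l ≤ p.length) && decide (p.take l = k)) := by
  induction prods with
  | nil => intro d k; simp
  | cons p prods ih =>
    intro d k
    simp only [List.foldl_cons, List.filter_cons]
    by_cases hp : l ≤ p.length
    · rw [if_pos hp, ih]
      by_cases hk : p.take l = k
      · subst hk
        simp [hp, PySem.Dict.getD_modify_self]
      · have h2 : (decide (l ≤ p.length) && decide (p.take l = k)) = false := by
          simp [hk]
        rw [h2]
        rw [PySem.Dict.getD_modify_of_ne _ _ _ (fun h => hk h.symm)]
        simp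
    · rw [if_neg hp, ih]
      have h2 : (decide (l ≤ p.length) && decide (p.take l = k)) = false := by
        simp [hp]
      rw [h2]
      simp

theorem lfoGroupsA_getD (prods : List (List String)) (l : Nat) (k : List String) :
    (lfoGroupsA prods l).getD k []
      = prods.filter (fun p => decide (l ≤ p.length) && decide (p.take l = k)) := by
  unfold lfoGroupsA
  rw [lfoGroupsA_getD_aux]
  simp

theorem lfoGroupsA_as_filter (prods : List (List String)) (l : Nat) :
    lfoGroupsA prods l
      = (prods.filter (fun p => decide (l ≤ p.length))).foldl
          (fun groups prod => groups.modify (prod.take l) [] (fun ms => ms ++ [prod]))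
          PySem.Dict.empty := by
  unfold lfoGroupsA
  rw [List.foldl_filter]
  congr 1
  funext groups prod
  by_cases hp : l ≤ prod.length <;> simp [hp]

theorem lfoGroupsA_keys (prods : List (List String)) (l : Nat) :
    (lfoGroupsA prods l).keys
      = PySem.Set.ofList ((prods.filter (fun p => decide (l ≤ p.length))).map (·.take l)) := by
  rw [lfoGroupsA_as_filter]
  rw [show (fun (groups : PySem.Dict (List String) (List (List String))) prod =>
        groups.modify (prod.take l) [] (fun ms => ms ++ [prod]))
      = (fun groups prod => groups.modify ((·.take l) prod) []
          ((fun (_ : PySem.Dict (List String) (List (List String))) (prod : List String)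
              (ms : List (List String)) => ms ++ [prod]) groups prod)) from rfl,
     PySem.Dict.keys_foldl_modify_key]
  simp [PySem.Set.ofList_eq_foldl, PySem.Set.update]

theorem lfoGroupsA_nodup (prods : List (List String)) (l : Nat) :
    (lfoGroupsA prods l).keys.Nodup := by
  rw [lfoGroupsA_as_filter]
  exact PySem.Dict.nodup_keys_foldl_modify_key _ (fun p => List.take l p) []
    (fun _ prod ms => ms ++ [prod]) _ (by simp [PySem.Dict.keys_empty])

theorem find?_foldl_add {α : Type} [BEq α] [LawfulBEq α] (q : α → Bool) :
    ∀ (ys s : List α), (ys.foldl PySem.Set.add s).find? q = (s.find? q).or (ys.find? q) := by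
  intro ys
  induction ys with
  | nil => intro s; simp
  | cons y ys ih =>
    intro s
    simp only [List.foldl_cons, PySem.Set.add]
    by_cases hy : PySem.Set.contains s y = true
    · rw [if_pos hy, ih, List.find?_cons]
      have hmem : y ∈ s := by simpa [PySem.Set.contains] using hy
      rcases hq : q y with _ | _
      · simp
      · have : (s.find? q).isSome := List.find?_isSome.mpr ⟨y, hmem, hq⟩
        obtain ⟨a, ha⟩ := Option.isSome_iff_exists.mp this
        simp [ha]
    · rw [if_neg hy, ih, List.find?_append, List.find?_cons]
      rcases hq : q y with _ | _ <;> simp [hq]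
  

theorem find?_ofList {α : Type} [BEq α] [LawfulBEq α] (q : α → Bool) (ys : List α) :
    (PySem.Set.ofList ys).find? q = ys.find? q := by
  rw [PySem.Set.ofList_eq_foldl, find?_foldl_add]
  simp

theorem find?_filter' {α : Type} (l : List α) (p q : α → Bool) :
    (l.filter p).find? q = l.find? (fun a => p a && q a) := by
  induction l with
  | nil => rfl
  | cons x xs ih =>
    simp only [List.filter_cons]
    rcases hp : p x with _ | _
    · simp only [if_neg (by simp : ¬ (false = true))]
      rw [List.find?_cons_of_neg (by simp [hp]), ih]
    · rw [if_pos rfl]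
      rcases hq : q x with _ | _
      · rw [List.find?_cons_of_neg (by simp [hq]), List.find?_cons_of_neg (by simp [hp, hq]), ih]
      · rw [List.find?_cons_of_pos hq, List.find?_cons_of_pos (by simp [hp, hq])]

theorem lfoCntp_eq_countP (prods : List (List String)) (p : List String) (l : Nat)
    (hp : l ≤ p.length) :
    lfoCntp prods (p.take l)
      = prods.countP (fun q => decide (l ≤ q.length) && decide (q.take l = p.take l)) := by
  unfold lfoCntp
  refine List.countP_congr ?_
  intro q _
  rw [List.isPrefixOf_iff_prefix]
  constructor
  · intro h
    have hlen : (p.take l).length = l := by simp [hp]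
    have h1 : l ≤ q.length := by
      have := h.length_le; omega
    have h2 : q.take l = p.take l := by
      have := List.prefix_iff_eq_take.mp h
      rw [hlen] at this
      exact this.symm
    simp [h1, h2]
  · intro h
    simp only [Bool.and_eq_true, decide_eq_true_eq] at h
    rw [← h.2]
    exact List.take_prefix l q

theorem find?_ext {α : Type} (l : List α) (p q : α → Bool) (h : ∀ a, p a = q a) :
    l.find? p = l.find? q := by
  have : p = q := funext h
  rw [this]

theorem lfoFirstSharedA_eq (prods : List (List String)) (l : Nat) :
    lfoFirstSharedA prods l = lfoPick prods l := by
  unfold lfoFirstSharedA lfoPick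
  rw [PySem.Dict.items_eq_map_keys _ (lfoGroupsA_nodup prods l) []]
  rw [List.find?_map, Option.map_map, lfoGroupsA_keys, find?_ofList, List.find?_map,
      Option.map_map, find?_filter']
  rw [find?_ext _ _ (lfoSharedP prods l) ?_]
  · rcases h : prods.find? (lfoSharedP prods l) with _ | p <;> simp
  · intro p
    simp only [Function.comp_apply, lfoSharedP]
    rcases hp : decide (l ≤ p.length) with _ | _
    · simp
    · have hp' : l ≤ p.length := of_decide_eq_true hp
      simp only [Bool.true_and]
      rw [lfoGroupsA_getD, show ∀ (L : List (List String)) (pr : List String → Bool),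
            (L.filter pr).length = L.countP pr from fun _ _ => (List.countP_eq_length_filter).symm,
          ← lfoCntp_eq_countP prods p l hp']

theorem lfoPick_isSome (prods : List (List String)) (l : Nat) :
    (lfoPick prods l).isSome = lfoShared prods l := by
  unfold lfoPick lfoShared
  rw [Option.isSome_map]
  rcases h : prods.any (lfoSharedP prods l) with _ | _
  · rw [List.any_eq_false] at h
    rw [List.find?_eq_none.mpr (fun x hx => by simpa using h x hx)]
    rfl
  · obtain ⟨x, hx, hpx⟩ := List.any_eq_true.mp h
    exact List.find?_isSome.mpr ⟨x, hx, hpx⟩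

theorem lfoPick_eq_none (prods : List (List String)) (l : Nat)
    (h : lfoShared prods l = false) : lfoPick prods l = none := by
  have := lfoPick_isSome prods l
  rw [h] at this
  simpa using this

theorem lfoLcpGoA_gt (prods : List (List String)) {b : Nat} (hb : lfoIsBest prods b) :
    ∀ (rem l : Nat) (best : List String), b < l →
      lfoLcpGoA prods l rem best = best := by
  intro rem l best hl
  cases rem with
  | zero => rfl
  | succ r =>
    show lfoLcpGoA prods l (r + 1) best = best
    unfold lfoLcpGoA
    rw [lfoFirstSharedA_eq, lfoPick_eq_none prods l (hb.2 l hl)]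

theorem lfoLcpGoA_le (prods : List (List String)) {b : Nat} (hb : lfoIsBest prods b)
    {t : List String} (ht : lfoPick prods b = some t) :
    ∀ (rem l : Nat) (best : List String), 1 ≤ l → l ≤ b → b < l + rem →
      lfoLcpGoA prods l rem best = t := by
  intro rem
  induction rem with
  | zero => intro l best _ h1 h2; omega
  | succ r ih =>
    intro l best hl1 hlb hbr
    show lfoLcpGoA prods l (r + 1) best = t
    unfold lfoLcpGoA
    rw [lfoFirstSharedA_eq]
    rcases Nat.lt_or_ge l b with hlt | hge
    · have hsh : lfoShared prods l = true := by
        rcases hb.1 with h0 | ⟨_, hshb⟩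
        · omega
        · exact lfoShared_mono prods (by omega) hshb
      have : (lfoPick prods l).isSome := by rw [lfoPick_isSome, hsh]
      obtain ⟨u, hu⟩ := Option.isSome_iff_exists.mp this
      rw [hu]
      exact ih (l + 1) u (by omega) (by omega) (by omega)
    · have hleb : l = b := by omega
      subst hleb
      rw [ht]
      exact lfoLcpGoA_gt prods hb r (l + 1) t (by omega)

def lfoSpecPfx (prods : List (List String)) (b : Nat) : List String :=
  if b = 0 then [] else (lfoPick prods b).getD []

theorem lfoShared_le_two (prods : List (List String)) (l : Nat)
    (h : lfoShared prods l = true) : 2 ≤ prods.length := by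
  obtain ⟨p, _, hp⟩ := List.any_eq_true.mp h
  simp only [lfoSharedP, Bool.and_eq_true, decide_eq_true_eq] at hp
  have := List.countP_le_length (p := fun q => (p.take l).isPrefixOf q) (l := prods)
  unfold lfoCntp at hp
  omega

theorem lfoLcpA_eq (prods : List (List String)) {b : Nat} (hb : lfoIsBest prods b) :
    lfoLcpA prods = lfoSpecPfx prods b := by
  unfold lfoLcpA lfoSpecPfx
  by_cases hlen : prods.length < 2
  · rw [if_pos hlen]
    have hb0 : b = 0 := by
      rcases hb.1 with h0 | ⟨_, hsh⟩
      · exact h0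
      · exact absurd (lfoShared_le_two prods b hsh) (by omega)
    rw [if_pos hb0]
  · rw [if_neg hlen]
    rcases hb.1 with h0 | ⟨hb1, hsh⟩
    · subst h0
      rw [if_pos rfl]
      exact lfoLcpGoA_gt prods hb _ 1 [] (by omega)
    · rw [if_neg (by omega)]
      obtain ⟨p, hpmem, hp⟩ := List.any_eq_true.mp hsh
      have hpb : b ≤ p.length := by
        simp only [lfoSharedP, Bool.and_eq_true, decide_eq_true_eq] at hp
        exact hp.1
      have hmax : p.length ≤ ((prods.map List.length).max?).getD 0 :=
        List.le_max?_getD_of_mem (List.mem_map_of_mem hpmem)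
      have hpick : (lfoPick prods b).isSome := by
        rw [lfoPick_isSome]; exact hsh
      obtain ⟨t, ht⟩ := Option.isSome_iff_exists.mp hpick
      rw [ht]
      exact lfoLcpGoA_le prods hb ht _ 1 [] (by omega) (by omega) (by omega)

-- ---- B side ----

-- the successive prefixes t0++[x1], t0++[x1,x2], … built by B's inner loop
def lfoPrefsOf (t0 : List String) : List String → List (List String)
  | [] => []
  | x :: xs => (t0 ++ [x]) :: lfoPrefsOf (t0 ++ [x]) xs

theorem lfoInnerEq (p : List String) :
    ∀ (cnt : PySem.Dict (List String) Int) (t0 : List String),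
      p.foldl
        (fun (st : PySem.Dict (List String) Int × List String) sym =>
          let t := st.2 ++ [sym]
          (st.1.insert t (st.1.getD t 0 + 1), t))
        (cnt, t0)
      = ((lfoPrefsOf t0 p).foldl (fun d t => d.insert t (d.getD t 0 + 1)) cnt, t0 ++ p) := by
  induction p with
  | nil => intro cnt t0; simp [lfoPrefsOf]
  | cons x xs ih =>
    intro cnt t0
    simp only [List.foldl_cons, lfoPrefsOf]
    rw [ih]
    simp

theorem get?_insFold (L : List (List String)) :
    ∀ (d : PySem.Dict (List String) Int) (t : List String),
      (L.foldl (fun d u => d.insert u (d.getD u 0 + 1)) d).get? t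
        = if t ∈ L then some (d.getD t 0 + (L.count t : Int)) else d.get? t := by
  induction L with
  | nil => intro d t; simp
  | cons u L ih =>
    intro d t
    simp only [List.foldl_cons]
    rw [ih]
    by_cases htu : t = u
    · subst htu
      simp only [List.mem_cons, true_or, if_pos]
      by_cases htL : t ∈ L
      · rw [if_pos htL]
        rw [PySem.Dict.getD_insert]
        simp
        ring
      · rw [if_neg htL, PySem.Dict.get?_insert]
        simp [List.count_eq_zero_of_not_mem htL]
    · by_cases htL : t ∈ L
      · rw [if_pos htL, if_pos (by simp [htL])]
        rw [PySem.Dict.getD_insert, if_neg htu]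
        simp [Ne.symm htu]
      · rw [if_neg htL, if_neg (by simp [htu, htL])]
        rw [PySem.Dict.get?_insert, if_neg htu]

theorem mem_lfoPrefsOf (p : List String) :
    ∀ (t0 t : List String),
      t ∈ lfoPrefsOf t0 p ↔ ∃ u, u ≠ [] ∧ u <+: p ∧ t = t0 ++ u := by
  induction p with
  | nil =>
    intro t0 t
    simp only [lfoPrefsOf, List.not_mem_nil, false_iff]
    rintro ⟨u, hu, hpre, _⟩
    exact hu (List.prefix_nil.mp hpre)
  | cons x xs ih =>
    intro t0 t
    simp only [lfoPrefsOf, List.mem_cons, ih]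
    constructor
    · rintro (rfl | ⟨u, hu, hpre, rfl⟩)
      · exact ⟨[x], by simp, ⟨xs, rfl⟩, rfl⟩
      · obtain ⟨w, hw⟩ := hpre
        exact ⟨x :: u, by simp, ⟨w, by simp [hw]⟩, by simp⟩
    · rintro ⟨u, hu, hpre, rfl⟩
      match u, hu with
      | v :: u', _ =>
        obtain ⟨w, hw⟩ := hpre
        injection hw with hv hw'
        subst hv
        by_cases hu' : u' = []
        · subst hu'; left; simp
        · right
          exact ⟨u', hu', ⟨w, hw'⟩, by simp⟩

theorem length_mem_lfoPrefsOf (p : List String) :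
    ∀ t0 t, t ∈ lfoPrefsOf t0 p → t0.length < t.length := by
  intro t0 t ht
  obtain ⟨u, hu, _, rfl⟩ := (mem_lfoPrefsOf p t0 t).mp ht
  have : 0 < u.length := List.length_pos_iff.mpr hu
  simp
  omega

theorem nodup_lfoPrefsOf (p : List String) : ∀ t0, (lfoPrefsOf t0 p).Nodup := by
  induction p with
  | nil => intro t0; simp [lfoPrefsOf]
  | cons x xs ih =>
    intro t0
    simp only [lfoPrefsOf, List.nodup_cons]
    refine ⟨fun hmem => ?_, ih (t0 ++ [x])⟩
    have := length_mem_lfoPrefsOf xs (t0 ++ [x]) _ hmem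
    simp at this

theorem mem_lfoPrefsOf_nil (p t : List String) :
    t ∈ lfoPrefsOf [] p ↔ t ≠ [] ∧ t <+: p := by
  rw [mem_lfoPrefsOf]
  constructor
  · rintro ⟨u, hu, hpre, rfl⟩; simpa using ⟨hu, hpre⟩
  · rintro ⟨ht, hpre⟩; exact ⟨t, ht, hpre, by simp⟩

theorem count_lfoPrefsOf_nil (p t : List String) :
    (lfoPrefsOf [] p).count t = (if t ≠ [] ∧ t <+: p then 1 else 0) := by
  by_cases h : t ∈ lfoPrefsOf [] p
  · rw [List.count_eq_one_of_mem (nodup_lfoPrefsOf p []) h,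
        if_pos ((mem_lfoPrefsOf_nil p t).mp h)]
  · rw [List.count_eq_zero_of_not_mem h,
        if_neg (fun hc => h ((mem_lfoPrefsOf_nil p t).mpr hc))]

theorem get?_lfoCntB_aux (t : List String) (prods : List (List String)) :
    ∀ (d : PySem.Dict (List String) Int),
      (prods.foldl
        (fun cnt p =>
          (p.foldl
            (fun (st : PySem.Dict (List String) Int × List String) sym =>
              let u := st.2 ++ [sym]
              (st.1.insert u (st.1.getD u 0 + 1), u))
            (cnt, [])).1) d).get? t
      = (if 0 < prods.countP (fun p => decide (t ≠ []) && t.isPrefixOf p)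
         then some (d.getD t 0 + (prods.countP (fun p => decide (t ≠ []) && t.isPrefixOf p) : Int))
         else d.get? t) := by
  induction prods with
  | nil => intro d; simp
  | cons p prods ih =>
    intro d
    simp only [List.foldl_cons]
    rw [lfoInnerEq]
    simp only
    rw [ih, get?_insFold, count_lfoPrefsOf_nil]
    have hiff : (t ∈ lfoPrefsOf [] p) ↔ (t ≠ [] ∧ t <+: p) := mem_lfoPrefsOf_nil p t
    by_cases hp : t ≠ [] ∧ t <+: p
    · have hc : (decide (t ≠ []) && t.isPrefixOf p) = true := by
        simp [List.isPrefixOf_iff_prefix, hp.1, hp.2]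
      have hmem : t ∈ lfoPrefsOf [] p := hiff.mpr hp
      rw [List.countP_cons, hc]
      have hgetD : ((lfoPrefsOf [] p).foldl (fun d u => d.insert u (d.getD u 0 + 1)) d).getD t 0
          = d.getD t 0 + 1 := by
        rw [PySem.Dict.getD_eq_get?_getD, get?_insFold, if_pos hmem, count_lfoPrefsOf_nil,
            if_pos hp]
        simp
      have hget? : ((lfoPrefsOf [] p).foldl (fun d u => d.insert u (d.getD u 0 + 1)) d).get? t
          = some (d.getD t 0 + 1) := by
        rw [get?_insFold, if_pos hmem, count_lfoPrefsOf_nil, if_pos hp]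
        simp
      rw [show (if (true = true) then (1 : Nat) else 0) = 1 from rfl]
      by_cases h0 : 0 < prods.countP (fun p => decide (t ≠ []) && t.isPrefixOf p)
      · rw [if_pos h0, if_pos (by omega), hgetD]
        congr 1
        push_cast
        ring
      · have hz : prods.countP (fun p => decide (t ≠ []) && t.isPrefixOf p) = 0 := by omega
        rw [if_neg h0, if_pos (by omega), if_pos hp, hz]
        simp
    · have hc : (decide (t ≠ []) && t.isPrefixOf p) = false := by
        rcases Decidable.em (t = []) with h | h
        · simp [h]
        · have hnp : ¬ t <+: p := fun hpre => hp ⟨h, hpre⟩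
          have : t.isPrefixOf p = false := by
            rcases hip : t.isPrefixOf p with _ | _
            · rfl
            · exact absurd (List.isPrefixOf_iff_prefix.mp hip) hnp
          simp [this]
      have hnmem : t ∉ lfoPrefsOf [] p := fun hm => hp (hiff.mp hm)
      rw [List.countP_cons, hc]
      rw [show (if (false = true) then (1 : Nat) else 0) = 0 from rfl, Nat.add_zero]
      have hgetD : ((lfoPrefsOf [] p).foldl (fun d u => d.insert u (d.getD u 0 + 1)) d).getD t 0
          = d.getD t 0 := by
        rw [PySem.Dict.getD_eq_get?_getD, get?_insFold, if_neg hnmem,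
            ← PySem.Dict.getD_eq_get?_getD]
      have hget? : ((lfoPrefsOf [] p).foldl (fun d u => d.insert u (d.getD u 0 + 1)) d).get? t
          = d.get? t := by
        rw [get?_insFold, if_neg hnmem]
      by_cases h0 : 0 < prods.countP (fun p => decide (t ≠ []) && t.isPrefixOf p)
      · rw [if_pos h0, if_pos h0, hgetD]
      · rw [if_neg h0, if_neg h0, if_neg hnmem]

theorem get?_lfoCntB (prods : List (List String)) (t : List String) :
    (lfoCntB prods).get? t
      = if t ≠ [] ∧ 0 < lfoCntp prods t then some (lfoCntp prods t : Int) else none := by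
  unfold lfoCntB
  rw [get?_lfoCntB_aux]
  by_cases ht : t = []
  · subst ht
    simp
  · have hcnt : prods.countP (fun p => decide (t ≠ []) && t.isPrefixOf p) = lfoCntp prods t := by
      unfold lfoCntp
      refine List.countP_congr ?_
      intro q _
      simp [ht]
    rw [hcnt]
    by_cases h0 : 0 < lfoCntp prods t
    · rw [if_pos h0, if_pos ⟨ht, h0⟩]
      simp
    · rw [if_neg h0, if_neg (by tauto)]
      simp

theorem nodup_keys_lfoCntB (prods : List (List String)) :
    (lfoCntB prods).keys.Nodup := by
  unfold lfoCntB
  suffices h : ∀ (d : PySem.Dict (List String) Int), d.keys.Nodup →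
      (prods.foldl
        (fun cnt p =>
          (p.foldl
            (fun (st : PySem.Dict (List String) Int × List String) sym =>
              let t := st.2 ++ [sym]
              (st.1.insert t (st.1.getD t 0 + 1), t))
            (cnt, [])).1) d).keys.Nodup by
    exact h PySem.Dict.empty (by simp [PySem.Dict.keys_empty])
  induction prods with
  | nil => intro d hd; simpa using hd
  | cons p prods ih =>
    intro d hd
    simp only [List.foldl_cons]
    rw [lfoInnerEq]
    exact ih _ (PySem.Dict.nodup_keys_foldl_insert _ (fun d t => d.getD t 0 + 1) d hd)

theorem lfoFoldMax_le (xs : List (List String × Int)) :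
    ∀ b, b ≤ xs.foldl
      (fun bestLen tc => if 2 ≤ tc.2 ∧ bestLen < tc.1.length then tc.1.length else bestLen) b := by
  induction xs with
  | nil => intro b; simp
  | cons x xs ih =>
    intro b
    simp only [List.foldl_cons]
    refine le_trans ?_ (ih _)
    split
    · omega
    · omega

theorem lfoFoldMax_mem (xs : List (List String × Int)) :
    ∀ b tc, tc ∈ xs → 2 ≤ tc.2 →
      tc.1.length ≤ xs.foldl
        (fun bestLen tc => if 2 ≤ tc.2 ∧ bestLen < tc.1.length then tc.1.length else bestLen) b := by
  induction xs with
  | nil => intro b tc h; simp at h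
  | cons x xs ih =>
    intro b tc hmem hc
    simp only [List.foldl_cons]
    rcases List.mem_cons.mp hmem with rfl | hmem'
    · refine le_trans ?_ (lfoFoldMax_le xs _)
      split
      · omega
      · omega
    · exact ih _ tc hmem' hc

theorem lfoFoldMax_cases (xs : List (List String × Int)) :
    ∀ b, (xs.foldl
        (fun bestLen tc => if 2 ≤ tc.2 ∧ bestLen < tc.1.length then tc.1.length else bestLen) b) = b
      ∨ ∃ tc ∈ xs, 2 ≤ tc.2 ∧ (xs.foldl
        (fun bestLen tc => if 2 ≤ tc.2 ∧ bestLen < tc.1.length then tc.1.length else bestLen) b)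
          = tc.1.length := by
  induction xs with
  | nil => intro b; left; rfl
  | cons x xs ih =>
    intro b
    simp only [List.foldl_cons]
    split
    · rename_i hx
      rcases ih x.1.length with h | ⟨tc, htc, hc, h⟩
      · right; exact ⟨x, List.mem_cons_self .., hx.1, h⟩
      · right; exact ⟨tc, List.mem_cons_of_mem _ htc, hc, h⟩
    · rcases ih b with h | ⟨tc, htc, hc, h⟩
      · left; exact h
      · right; exact ⟨tc, List.mem_cons_of_mem _ htc, hc, h⟩

theorem get?_lfoCntB_of_shared (prods : List (List String)) (t : List String)
    (ht : t ≠ []) (hc : 0 < lfoCntp prods t) :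
    (lfoCntB prods).get? t = some (lfoCntp prods t : Int) := by
  rw [get?_lfoCntB, if_pos ⟨ht, hc⟩]

theorem lfoBestLenB_isBest (prods : List (List String)) :
    lfoIsBest prods (lfoBestLenB (lfoCntB prods)) := by
  constructor
  · rcases lfoFoldMax_cases (lfoCntB prods).items 0 with h | ⟨tc, htc, hc2, h⟩
    · left; exact h
    · right
      obtain ⟨t, c⟩ := tc
      have hget : (lfoCntB prods).get? t = some c :=
        PySem.Dict.get?_of_mem_items _ htc (nodup_keys_lfoCntB prods)
      rw [get?_lfoCntB] at hget
      by_cases hcond : t ≠ [] ∧ 0 < lfoCntp prods t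
      · rw [if_pos hcond] at hget
        injection hget with hget
        have hcnt2 : 2 ≤ lfoCntp prods t := by
          simp only at hc2
          omega
        have ht1 : 1 ≤ t.length := List.length_pos_iff.mpr hcond.1
        obtain ⟨p, hpmem, hppre⟩ := List.countP_pos_iff.mp hcond.2
        rw [List.isPrefixOf_iff_prefix] at hppre
        have htake : p.take t.length = t := (List.prefix_iff_eq_take.mp hppre).symm
        have hbl : lfoBestLenB (lfoCntB prods) = t.length := by
          unfold lfoBestLenB
          simpa using h
        refine ⟨by omega, ?_⟩
        rw [hbl]
        refine List.any_eq_true.mpr ⟨p, hpmem, ?_⟩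
        simp only [lfoSharedP, Bool.and_eq_true, decide_eq_true_eq]
        exact ⟨hppre.length_le, by rw [htake]; exact hcnt2⟩
      · rw [if_neg hcond] at hget
        exact absurd hget (by simp)
  · intro j hj
    by_contra hsh
    have hsh' : lfoShared prods j = true := by
      rcases h : lfoShared prods j with _ | _
      · exact absurd h hsh
      · rfl
    obtain ⟨p, hpmem, hp⟩ := List.any_eq_true.mp hsh'
    simp only [lfoSharedP, Bool.and_eq_true, decide_eq_true_eq] at hp
    obtain ⟨hlen, hcnt⟩ := hp
    have hj1 : 1 ≤ j := by omega
    have htlen : (p.take j).length = j := by simp [hlen]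
    have htne : p.take j ≠ [] := by
      intro h0
      rw [h0] at htlen
      simp at htlen
      omega
    have hget : (lfoCntB prods).get? (p.take j) = some (lfoCntp prods (p.take j) : Int) :=
      get?_lfoCntB_of_shared prods _ htne (by omega)
    have hmem : (p.take j, (lfoCntp prods (p.take j) : Int)) ∈ (lfoCntB prods).items :=
      PySem.Dict.mem_items_of_get?_eq_some _ hget
    have := lfoFoldMax_mem (lfoCntB prods).items 0 _ hmem (by simp; omega)
    simp only at this
    rw [htlen] at this
    unfold lfoBestLenB at hj
    omega

theorem lfoScanB_cond (prods : List (List String)) (b : Nat) (hb : 1 ≤ b) (p : List String) :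
    (b ≤ p.length ∧ 2 ≤ (lfoCntB prods).getD (p.take b) 0) ↔ lfoSharedP prods b p = true := by
  simp only [lfoSharedP, Bool.and_eq_true, decide_eq_true_eq]
  constructor
  · rintro ⟨h1, h2⟩
    refine ⟨h1, ?_⟩
    rw [PySem.Dict.getD_eq_get?_getD, get?_lfoCntB] at h2
    by_cases hc : p.take b ≠ [] ∧ 0 < lfoCntp prods (p.take b)
    · rw [if_pos hc] at h2
      simp at h2
      omega
    · rw [if_neg hc] at h2
      simp at h2
  · rintro ⟨h1, h2⟩
    refine ⟨h1, ?_⟩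
    have htne : p.take b ≠ [] := by
      intro h0
      have : (p.take b).length = b := by simp [h1]
      rw [h0] at this
      simp at this
      omega
    rw [PySem.Dict.getD_eq_get?_getD, get?_lfoCntB, if_pos ⟨htne, by omega⟩]
    simp
    omega

theorem lfoScanB_aux (prods : List (List String)) (b : Nat) (hb : 1 ≤ b) :
    ∀ xs, lfoScanB (lfoCntB prods) b xs
      = ((xs.find? (lfoSharedP prods b)).map (·.take b)).getD [] := by
  intro xs
  induction xs with
  | nil => rfl
  | cons p rest ih =>
    show (if b ≤ p.length ∧ 2 ≤ (lfoCntB prods).getD (p.take b) 0 then p.take b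
          else lfoScanB (lfoCntB prods) b rest) = _
    by_cases hc : b ≤ p.length ∧ 2 ≤ (lfoCntB prods).getD (p.take b) 0
    · rw [if_pos hc, List.find?_cons_of_pos ((lfoScanB_cond prods b hb p).mp hc)]
      rfl
    · have hnc : ¬ (lfoSharedP prods b p = true) :=
        fun h => hc ((lfoScanB_cond prods b hb p).mpr h)
      rw [if_neg hc, List.find?_cons_of_neg (by simpa using hnc), ih]

theorem lfoScanB_eq (prods : List (List String)) (b : Nat) (hb : 1 ≤ b) :
    lfoScanB (lfoCntB prods) b prods = (lfoPick prods b).getD [] := by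
  rw [lfoScanB_aux prods b hb prods]
  unfold lfoPick
  rfl

theorem lfoPfx_agree (prods : List (List String)) :
    lfoLcpA prods
      = (if lfoBestLenB (lfoCntB prods) ≠ 0
         then lfoScanB (lfoCntB prods) (lfoBestLenB (lfoCntB prods)) prods else []) := by
  rw [lfoLcpA_eq prods (lfoBestLenB_isBest prods)]
  unfold lfoSpecPfx
  by_cases h0 : lfoBestLenB (lfoCntB prods) = 0
  · rw [if_pos h0, if_neg (by omega)]
  · rw [if_neg h0, if_pos h0, lfoScanB_eq prods _ (by omega)]

-- ---- per-entry and outer loop ----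

theorem lfoNewNTGo_agree (keys : List String) :
    ∀ (fuel : Nat) (c : String), lfoNewNTGoA keys fuel c = lfoNewNTGoB keys fuel c := by
  intro fuel
  induction fuel with
  | zero => intro c; rfl
  | succ f ih =>
    intro c
    simp only [lfoNewNTGoA, lfoNewNTGoB]
    split <;> simp [ih]

theorem lfoPartA_closed (L : Nat) (pfx : List String) :
    ∀ (xs : List (List String)) (m0 n0 : List (List String)),
      xs.foldl
        (fun (mn : List (List String) × List (List String)) prod =>
          if prod.take L = pfx then (mn.1 ++ [prod], mn.2) else (mn.1, mn.2 ++ [prod]))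
        (m0, n0)
      = (m0 ++ xs.filter (fun p => decide (p.take L = pfx)),
         n0 ++ xs.filter (fun p => !(decide (p.take L = pfx)))) := by
  intro xs
  induction xs with
  | nil => intro m0 n0; simp
  | cons p xs ih =>
    intro m0 n0
    simp only [List.foldl_cons, List.filter_cons]
    by_cases hp : p.take L = pfx
    · rw [if_pos hp, ih]
      simp [hp]
    · rw [if_neg hp, ih]
      simp [hp]

theorem lfoSuffixA_closed (g : List String → List String) :
    ∀ (xs : List (List String)) (acc : List (List String)),
      xs.foldl (fun acc prod => acc ++ [g prod]) acc = acc ++ xs.map g := by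
  intro xs
  induction xs with
  | nil => intro acc; simp
  | cons p xs ih =>
    intro acc
    simp only [List.foldl_cons, List.map_cons]
    rw [ih]
    simp

theorem lfoPartB_closed (L : Nat) (pfx : List String) (g : List String → List String) :
    ∀ (xs : List (List String)) (a0 s0 : List (List String)),
      xs.foldl
        (fun (ns : List (List String) × List (List String)) p =>
          if p.take L = pfx then (ns.1, ns.2 ++ [g p]) else (ns.1 ++ [p], ns.2))
        (a0, s0)
      = (a0 ++ xs.filter (fun p => !(decide (p.take L = pfx))),
         s0 ++ (xs.filter (fun p => decide (p.take L = pfx))).map g) := by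
  intro xs
  induction xs with
  | nil => intro a0 s0; simp
  | cons p xs ih =>
    intro a0 s0
    simp only [List.foldl_cons, List.filter_cons]
    by_cases hp : p.take L = pfx
    · rw [if_pos hp, ih]
      simp [hp]
    · rw [if_neg hp, ih]
      simp [hp]

theorem lfoStep_agree (keys : List String) (st : PySem.Dict String (List (List String)) × Bool)
    (e : String × List (List String)) : lfoStepA keys st e = lfoStepB keys st e := by
  unfold lfoStepA lfoStepB
  simp only [← lfoPfx_agree e.2]
  by_cases hpfx : (lfoLcpA e.2).isEmpty
  · rw [if_pos hpfx, if_pos hpfx]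
  · rw [if_neg hpfx, if_neg hpfx]
    have hnt : lfoNewNTA e.1 keys = lfoNewNTGoB keys (keys.length + 1) (e.1 ++ "'") := by
      unfold lfoNewNTA
      exact lfoNewNTGo_agree keys (keys.length + 1) (e.1 ++ "'")
    rw [hnt]
    rw [lfoPartA_closed (lfoLcpA e.2).length (lfoLcpA e.2) e.2 [] [],
        lfoPartB_closed (lfoLcpA e.2).length (lfoLcpA e.2)
          (fun prod => if (prod.drop (lfoLcpA e.2).length).isEmpty then ["eps"]
                       else prod.drop (lfoLcpA e.2).length) e.2 _ [],
        lfoSuffixA_closed]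
    simp

theorem left_factor_once_eq (grammar : List (String × List (List String))) :
    left_factor_once grammar = left_factor_once_alt grammar := by
  unfold left_factor_once left_factor_once_alt
  have h : lfoStepA (grammar.map (·.1)) = lfoStepB (grammar.map (·.1)) := by
    funext st e
    exact lfoStep_agree (grammar.map (·.1)) st e
  rw [h]

-- ===== VERDICT (by name: the statement is the Claim_ definition above) =====
theorem left_factor_once_spec : Claim_equal_left_factor_once := by
  intro grammar _hdom
  unfold Spec_left_factor_once
  exact left_factor_once_eq grammar
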